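-- pv_equiv track=rewrite | github.com/aghozlane/iRNA | irna/iRNA_pred/Parse.py | getResultSequence_RNAhybrid
-- ===== SOURCE A (Python) =====
-- def getResultSequence_RNAhybrid(out_RNA, in_RNA,  RNA_begin, length_RNA, int_char):
--     """
--     Get contact sequence.
--     @param out_RNA: Non contact nucleotid
--     @param in_RNA: Contact nucleotid
--     @param RNA_begin: Begining position of the RNA
--     @param length_RNA: Length of the RNA sequence
--     @param int_char: Interaction caracter
--     """
--     RNA_R=list("."*length_RNA)
--     a=0
--     i=RNA_begin
--     while( a<len(in_RNA)):
--         #Point de contact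
--         if(in_RNA[a]=="A" or in_RNA[a]=="U" or in_RNA[a]=="G" or in_RNA[a]=="C"):
--             RNA_R[i]=int_char
--             a+=1
--             i+=1
--         #Point de non contact
--         elif(out_RNA[a]=="A" or out_RNA[a]=="U" or out_RNA[a]=="G" or out_RNA[a]=="C"):
--             a+=1
--             i+=1
--         #Cas d'un saut
--         else:
--             a+=1
--     return "".join(RNA_R)
-- ===== SOURCE B (Python) =====
-- from itertools import accumulate
--
-- def getResultSequence_RNAhybrid(out_RNA, in_RNA, RNA_begin, length_RNA, int_char):
--     nuc = set("AUGC")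
--     # prefix-sum formulation: column a advances the output index iff it carries a
--     # nucleotide in in_RNA or, failing that, in out_RNA
--     steps = [1 if (c in nuc or (a < len(out_RNA) and out_RNA[a] in nuc)) else 0
--              for a, c in enumerate(in_RNA)]
--     idx = list(accumulate(steps, initial=0))
--     marked = {RNA_begin + idx[a] for a, c in enumerate(in_RNA) if c in nuc}
--     return "".join(int_char if p in marked else "." for p in range(length_RNA))
-- ===== Notes on version B (the rewrite author's own statement) =====
-- stated objective: alternative
-- what changed: A's stateful index-and-mutate while-loop over a dot template is replaced by a prefix-sum formulation: per-column advance flags, itertools.accumulate for the running output index, a set of marked positions, and the result generated positionally by membership test instead of by list mutation.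
-- intended difference: On inputs where in_RNA's first contact nucleotide gets a negative output position (RNA_begin plus the out_RNA nucleotides before it is < 0), A's negative list assignment silently wraps and marks a cell near the right end of the sequence, while B leaves positions outside the sequence unmarked, which is the intended annotation since a negative position is not part of the RNA (with int_char '.' the wrapped mark is invisible and the two agree). — e.g. on getResultSequence_RNAhybrid("", "A", -1, 2, "*"): A returns ".*", B returns ".."
import Mathlib
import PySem

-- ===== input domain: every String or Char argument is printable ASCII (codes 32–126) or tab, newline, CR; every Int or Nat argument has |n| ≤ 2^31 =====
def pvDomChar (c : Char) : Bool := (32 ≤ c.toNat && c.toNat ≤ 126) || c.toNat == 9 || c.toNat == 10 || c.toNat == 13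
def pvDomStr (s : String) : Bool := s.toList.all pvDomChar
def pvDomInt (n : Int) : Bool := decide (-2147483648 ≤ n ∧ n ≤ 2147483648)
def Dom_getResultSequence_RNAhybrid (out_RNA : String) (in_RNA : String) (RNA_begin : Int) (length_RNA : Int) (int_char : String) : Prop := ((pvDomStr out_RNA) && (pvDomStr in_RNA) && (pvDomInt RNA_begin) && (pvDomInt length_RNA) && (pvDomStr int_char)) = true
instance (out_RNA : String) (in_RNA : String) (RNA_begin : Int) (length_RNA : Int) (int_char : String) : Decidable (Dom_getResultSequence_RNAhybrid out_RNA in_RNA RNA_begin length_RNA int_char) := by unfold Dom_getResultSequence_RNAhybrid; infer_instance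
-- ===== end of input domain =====

-- B replaces A's stateful index-and-mutate scan by a prefix-sum/set-membership formulation;
-- D_ states the intended difference: where A's negative list index silently wraps, B leaves
-- positions outside the sequence unmarked. Same asymptotic cost ("alternative").


-- ===== PORT A =====
-- c == "A" or c == "U" or c == "G" or c == "C"
def pvAUGC (c : Char) : Bool := c == 'A' || c == 'U' || c == 'G' || c == 'C'

-- A's while loop: a walks in_RNA (and out_RNA in lockstep, so the remaining out-suffix
-- drops its head every iteration); RNA_R is a list of strings (each cell "." or int_char).
-- RNA_R[i]=int_char is PySem.List.pySetD (exact Python list assignment incl. negative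
-- index wrap wherever Python does not raise; Pre_ excludes the raising inputs).
-- out_RNA[a] is the head of the remaining out-suffix ('.' default only reachable outside Pre_).
def pvLoopA (ic : String) : List Char → List Char → List String → Int → List String
  | [], _, r, _ => r
  | c :: ins, outs, r, i =>
    if pvAUGC c then pvLoopA ic ins outs.tail (PySem.List.pySetD r i ic) (i + 1)
    else if pvAUGC (outs.headD '.') then pvLoopA ic ins outs.tail r (i + 1)
    else pvLoopA ic ins outs.tail r i

def getResultSequence_RNAhybrid (out_RNA : String) (in_RNA : String) (RNA_begin : Int) (length_RNA : Int) (int_char : String) : String :=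
  let RNA_R : List String := List.replicate length_RNA.toNat "."   -- list("."*length_RNA); negative length gives []
  PySem.Str.join "" (pvLoopA int_char in_RNA.toList out_RNA.toList RNA_R RNA_begin)

-- ===== PORT B =====
-- nuc = set("AUGC")
def pvNuc : PySem.Set Char := PySem.Set.ofList "AUGC".toList

-- Source B, line for line: per-column advance flags, accumulate (= List.scanl with initial 0),
-- the set of marked positions, and a positional membership join.
-- 'c in nuc' is PySem.Set.contains; out_RNA[a] under the guard a < len(out_RNA) is in range,
-- ported as List.pyGetD with an unreachable default.
def getResultSequence_RNAhybrid_alt (out_RNA : String) (in_RNA : String) (RNA_begin : Int) (length_RNA : Int) (int_char : String) : String :=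
  let ins := in_RNA.toList
  let outs := out_RNA.toList
  let steps : List Int := (PySem.List.enumerate ins 0).map (fun ac =>
    if PySem.Set.contains pvNuc ac.2 ||
       (decide (ac.1 < (outs.length : Int)) && PySem.Set.contains pvNuc (PySem.List.pyGetD outs ac.1 ' '))
    then 1 else 0)
  let idx : List Int := List.scanl (· + ·) 0 steps   -- list(accumulate(steps, initial=0))
  let marked : PySem.Set Int := PySem.Set.ofList
    (((PySem.List.enumerate ins 0).filter (fun ac => PySem.Set.contains pvNuc ac.2)).map
      (fun ac => RNA_begin + PySem.List.pyGetD idx ac.1 0))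
  PySem.Str.join "" ((PySem.List.pyRange 0 length_RNA 1).map
    (fun p => if PySem.Set.contains marked p then int_char else "."))

-- ===== PRECONDITION & SPEC =====
-- pvNonskip ins outs a: column a advances the output index (a nucleotide in in_RNA, else in out_RNA)
def pvNonskip (ins outs : List Char) (b : Nat) : Bool :=
  pvAUGC (ins.getD b ' ') || pvAUGC (outs.getD b ' ')

-- pvIdxAt: the running output index A holds when it reaches column a
def pvIdxAt (ins outs : List Char) (rb : Int) (a : Nat) : Int :=
  rb + ((List.range a).countP (pvNonskip ins outs) : Int)

-- Pre_ excludes exactly the inputs on which Python A raises IndexError: a contact column whose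
-- write lands outside the result list, or a non-contact column beyond the end of out_RNA.
def Pre_getResultSequence_RNAhybrid (out_RNA : String) (in_RNA : String) (RNA_begin : Int) (length_RNA : Int) (int_char : String) : Prop :=
  ∀ a, a < in_RNA.toList.length →
    if pvAUGC (in_RNA.toList.getD a ' ') then
      -(max length_RNA 0) ≤ pvIdxAt in_RNA.toList out_RNA.toList RNA_begin a ∧
      pvIdxAt in_RNA.toList out_RNA.toList RNA_begin a < max length_RNA 0
    else a < out_RNA.toList.length

instance (out_RNA : String) (in_RNA : String) (RNA_begin : Int) (length_RNA : Int) (int_char : String) : Decidable (Pre_getResultSequence_RNAhybrid out_RNA in_RNA RNA_begin length_RNA int_char) := by unfold Pre_getResultSequence_RNAhybrid; infer_instance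

def pvWitness_getResultSequence_RNAhybrid : String × String × Int × Int × String := ("x.", "AU", 0, 3, "*")

-- On inputs where a contact nucleotide's output position is negative — i.e. RNA_begin plus the
-- nucleotides of out_RNA preceding in_RNA's first contact nucleotide is < 0 — A's negative list
-- assignment silently wraps and marks a cell near the right end, while B leaves positions outside
-- the sequence unmarked — the intended annotation, since a negative position is not part of the
-- RNA (with int_char "." the wrapped mark is invisible and the two agree).
def D_getResultSequence_RNAhybrid (out_RNA : String) (in_RNA : String) (RNA_begin : Int) (length_RNA : Int) (int_char : String) : Prop :=
  (in_RNA.toList.takeWhile (fun c => !pvAUGC c)).length < in_RNA.toList.length ∧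
  RNA_begin + ((out_RNA.toList.take (in_RNA.toList.takeWhile (fun c => !pvAUGC c)).length).countP pvAUGC : Int) < 0

instance (out_RNA : String) (in_RNA : String) (RNA_begin : Int) (length_RNA : Int) (int_char : String) : Decidable (D_getResultSequence_RNAhybrid out_RNA in_RNA RNA_begin length_RNA int_char) := by unfold D_getResultSequence_RNAhybrid; infer_instance

def Spec_getResultSequence_RNAhybrid (out_RNA : String) (in_RNA : String) (RNA_begin : Int) (length_RNA : Int) (int_char : String) (out : String) : Prop := ¬ D_getResultSequence_RNAhybrid out_RNA in_RNA RNA_begin length_RNA int_char → out = getResultSequence_RNAhybrid_alt out_RNA in_RNA RNA_begin length_RNA int_char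
instance (out_RNA : String) (in_RNA : String) (RNA_begin : Int) (length_RNA : Int) (int_char : String) (out : String) : Decidable (Spec_getResultSequence_RNAhybrid out_RNA in_RNA RNA_begin length_RNA int_char out) := by unfold Spec_getResultSequence_RNAhybrid; infer_instance

def pvDiffWitness_getResultSequence_RNAhybrid : String × String × Int × Int × String := ("", "A", -1, 2, "*")
def pvDiffWitnessOut_getResultSequence_RNAhybrid : String × String := (".*", "..")

-- ===== CLAIM =====
def Claim_unchanged_getResultSequence_RNAhybrid : Prop := ∀ (out_RNA : String) (in_RNA : String) (RNA_begin : Int) (length_RNA : Int) (int_char : String), Dom_getResultSequence_RNAhybrid out_RNA in_RNA RNA_begin length_RNA int_char → Pre_getResultSequence_RNAhybrid out_RNA in_RNA RNA_begin length_RNA int_char → Spec_getResultSequence_RNAhybrid out_RNA in_RNA RNA_begin length_RNA int_char (getResultSequence_RNAhybrid out_RNA in_RNA RNA_begin length_RNA int_char)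
def Claim_changed_getResultSequence_RNAhybrid : Prop := Dom_getResultSequence_RNAhybrid (pvDiffWitness_getResultSequence_RNAhybrid.1) (pvDiffWitness_getResultSequence_RNAhybrid.2.1) (pvDiffWitness_getResultSequence_RNAhybrid.2.2.1) (pvDiffWitness_getResultSequence_RNAhybrid.2.2.2.1) (pvDiffWitness_getResultSequence_RNAhybrid.2.2.2.2) ∧ Pre_getResultSequence_RNAhybrid (pvDiffWitness_getResultSequence_RNAhybrid.1) (pvDiffWitness_getResultSequence_RNAhybrid.2.1) (pvDiffWitness_getResultSequence_RNAhybrid.2.2.1) (pvDiffWitness_getResultSequence_RNAhybrid.2.2.2.1) (pvDiffWitness_getResultSequence_RNAhybrid.2.2.2.2) ∧ D_getResultSequence_RNAhybrid (pvDiffWitness_getResultSequence_RNAhybrid.1) (pvDiffWitness_getResultSequence_RNAhybrid.2.1) (pvDiffWitness_getResultSequence_RNAhybrid.2.2.1) (pvDiffWitness_getResultSequence_RNAhybrid.2.2.2.1) (pvDiffWitness_getResultSequence_RNAhybrid.2.2.2.2) ∧ getResultSequence_RNAhybrid (pvDiffWitness_getResultSequence_RNAhybrid.1) (pvDiffWitness_getResultSequence_RNAhybrid.2.1)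 (pvDiffWitness_getResultSequence_RNAhybrid.2.2.1) (pvDiffWitness_getResultSequence_RNAhybrid.2.2.2.1) (pvDiffWitness_getResultSequence_RNAhybrid.2.2.2.2) = pvDiffWitnessOut_getResultSequence_RNAhybrid.1 ∧ getResultSequence_RNAhybrid_alt (pvDiffWitness_getResultSequence_RNAhybrid.1) (pvDiffWitness_getResultSequence_RNAhybrid.2.1) (pvDiffWitness_getResultSequence_RNAhybrid.2.2.1) (pvDiffWitness_getResultSequence_RNAhybrid.2.2.2.1) (pvDiffWitness_getResultSequence_RNAhybrid.2.2.2.2) = pvDiffWitnessOut_getResultSequence_RNAhybrid.2 ∧ pvDiffWitnessOut_getResultSequence_RNAhybrid.1 ≠ pvDiffWitnessOut_getResultSequence_RNAhybrid.2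

-- ===== LEMMAS AND PROOFS =====
theorem pvWitness_ok :
    Dom_getResultSequence_RNAhybrid pvWitness_getResultSequence_RNAhybrid.1 pvWitness_getResultSequence_RNAhybrid.2.1 pvWitness_getResultSequence_RNAhybrid.2.2.1 pvWitness_getResultSequence_RNAhybrid.2.2.2.1 pvWitness_getResultSequence_RNAhybrid.2.2.2.2 ∧
    Pre_getResultSequence_RNAhybrid pvWitness_getResultSequence_RNAhybrid.1 pvWitness_getResultSequence_RNAhybrid.2.1 pvWitness_getResultSequence_RNAhybrid.2.2.1 pvWitness_getResultSequence_RNAhybrid.2.2.2.1 pvWitness_getResultSequence_RNAhybrid.2.2.2.2 := by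
  decide

-- the list of marks A performs, in column order (proof-side normal form of A's loop)
def pvMarks : List Char → List Char → Int → List Int
  | [], _, _ => []
  | c :: ins, outs, i =>
    if pvAUGC c then i :: pvMarks ins outs.tail (i + 1)
    else if pvAUGC (outs.headD '.') then pvMarks ins outs.tail (i + 1)
    else pvMarks ins outs.tail i

-- A's loop is the marks list folded onto the result list.
theorem pvLoopA_eq_foldl_marks (ic : String) :
    ∀ (ins outs : List Char) (r : List String) (i : Int),
      pvLoopA ic ins outs r i =
        (pvMarks ins outs i).foldl (fun r m => PySem.List.pySetD r m ic) r := by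
  intro ins
  induction ins with
  | nil => intro outs r i; simp [pvLoopA, pvMarks]
  | cons c t ih =>
    intro outs r i
    simp only [pvLoopA, pvMarks]
    split_ifs with h h2 <;> simp [ih]

theorem pvNonskip_cons (c : Char) (t outs : List Char) (a : Nat) :
    pvNonskip (c :: t) outs (a+1) = pvNonskip t outs.tail a := by
  simp [pvNonskip]

theorem pvNonskip_zero (c : Char) (t outs : List Char) :
    pvNonskip (c :: t) outs 0 = (pvAUGC c || pvAUGC (outs.headD '.')) := by
  cases outs <;> simp [pvNonskip, pvAUGC]

theorem pvIdxAt_cons (c : Char) (t outs : List Char) (rb : Int) (a : Nat) :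
    pvIdxAt (c :: t) outs rb (a+1) =
      pvIdxAt t outs.tail (rb + (if (pvAUGC c || pvAUGC (outs.headD '.')) then 1 else 0)) a := by
  unfold pvIdxAt
  rw [List.range_succ_eq_map, List.countP_cons, List.countP_map]
  have h1 : (pvNonskip (c :: t) outs ∘ Nat.succ) = pvNonskip t outs.tail := by
    funext a; simpa using pvNonskip_cons c t outs a
  rw [h1, pvNonskip_zero]
  split_ifs <;> push_cast <;> ring

theorem pvIdxAt_zero (ins outs : List Char) (rb : Int) : pvIdxAt ins outs rb 0 = rb := by
  simp [pvIdxAt]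

theorem pvMarks_closed : ∀ (ins outs : List Char) (rb : Int),
    pvMarks ins outs rb =
      ((List.range ins.length).filter (fun a => pvAUGC (ins.getD a ' '))).map
        (fun a => pvIdxAt ins outs rb a) := by
  intro ins
  induction ins with
  | nil => intro outs rb; simp [pvMarks]
  | cons c t ih =>
    intro outs rb
    have hlen : (c :: t).length = t.length + 1 := rfl
    rw [hlen, List.range_succ_eq_map]
    simp only [pvMarks, List.filter_cons, List.filter_map, List.map_map, List.getD_cons_zero]
    have hc : ∀ a, ((fun a => pvAUGC ((c :: t).getD a ' ')) ∘ Nat.succ) a = pvAUGC (t.getD a ' ') := by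
      intro a; simp
    have hfil : List.filter ((fun a => pvAUGC ((c :: t).getD a ' ')) ∘ Nat.succ) (List.range t.length)
        = List.filter (fun a => pvAUGC (t.getD a ' ')) (List.range t.length) := by
      apply List.filter_congr; intro a _; simpa using hc a
    have hmap : ∀ (s : Int), ((List.range t.length).filter (fun a => pvAUGC (t.getD a ' '))).map
          ((fun a => pvIdxAt (c :: t) outs rb a) ∘ Nat.succ)
        = ((List.range t.length).filter (fun a => pvAUGC (t.getD a ' '))).map
          (fun a => pvIdxAt t outs.tail (rb + (if (pvAUGC c || pvAUGC (outs.headD '.')) then 1 else 0)) a) := by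
      intro _; apply List.map_congr_left; intro a _; simpa using pvIdxAt_cons c t outs rb a
    simp only [ih]
    have hstep1 : pvAUGC c = true → (if (pvAUGC c || pvAUGC (outs.headD '.')) = true then (1:Int) else 0) = 1 := by
      intro h; simp [h]
    split_ifs with h1 h2
    · simp only [List.filter_cons_of_pos (by simpa using h1), List.map_cons, List.map_map]
      rw [hfil, hmap 0, hstep1 h1, pvIdxAt_zero]
    · have hstep : (if (pvAUGC c || pvAUGC (outs.headD '.')) = true then (1:Int) else 0) = 1 := by
        rw [if_pos (by rw [h2, Bool.or_true])]
      simp only [List.filter_cons_of_neg (by simpa using h1), List.map_map]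
      rw [hfil, hmap 0, hstep]
    · have hstep : (if (pvAUGC c || pvAUGC (outs.headD '.')) = true then (1:Int) else 0) = 0 := by
        rw [if_neg (by simp only [Bool.or_eq_true]; rintro (h | h); exacts [h1 h, h2 h])]
      simp only [List.filter_cons_of_neg (by simpa using h1), List.map_map]
      rw [hfil, hmap 0, hstep, add_zero]

-- scanl prefix sums
theorem pvScanl_getD : ∀ (l : List Int) (s : Int) (k : Nat), k ≤ l.length →
    (List.scanl (· + ·) s l).getD k 0 = s + (l.take k).sum := by
  intro l
  induction l with
  | nil =>
    intro s k hk
    have hk0 : k = 0 := by simpa using hk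
    simp [hk0]
  | cons x t ih =>
    intro s k hk
    cases k with
    | zero => simp
    | succ k =>
      simp only [List.scanl_cons, List.getD_cons_succ, List.take_succ_cons, List.sum_cons]
      rw [ih (s + x) k (by simpa using hk)]
      ring

-- indicator sums are counts
theorem pvSum_indicator (p : Nat → Bool) : ∀ (n : Nat),
    (((List.range n).map (fun a => if p a then (1:Int) else 0)).sum) = ((List.range n).countP p : Int) := by
  intro n
  induction n with
  | zero => simp
  | succ n ih =>
    rw [List.range_succ, List.map_append, List.sum_append, List.countP_append, ih]
    by_cases h : p n <;> simp [h, List.countP_cons]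

-- fold of in-range writes, elementwise
theorem pvFoldSet (ic : String) : ∀ (mks : List Int) (r : List String),
    (∀ m ∈ mks, 0 ≤ m ∧ m < (r.length : Int)) →
    mks.foldl (fun r m => PySem.List.pySetD r m ic) r =
      (List.range r.length).map (fun (p : Nat) => if (p : Int) ∈ mks then ic else r.getD p ".") := by
  intro mks
  induction mks with
  | nil =>
    intro r _
    apply List.ext_getElem (by simp)
    intro p hp hq
    have hp2 : p < r.length := by simpa using hp
    simp [hp2, List.getD_eq_getElem?_getD, List.getElem?_eq_getElem hp2]
  | cons m ms ih =>
    intro r hb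
    have hm := hb m (by simp)
    have hset : PySem.List.pySetD r m ic = r.set m.toNat ic := PySem.List.pySetD_of_nonneg _ _ hm.1
    simp only [List.foldl_cons, hset]
    rw [ih (r.set m.toNat ic) (by intro x hx; simpa using hb x (List.mem_cons_of_mem _ hx))]
    simp only [List.length_set]
    apply List.map_congr_left
    intro p hp
    have hp' : p < r.length := by simpa using hp
    by_cases h1 : (p : Int) ∈ ms
    · simp [h1]
    · by_cases h2 : (p : Int) = m
      · have hpm : p = m.toNat := by omega
        rw [if_neg h1, if_pos (by simp [h2]), List.getD_eq_getElem?_getD, hpm,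
          List.getElem?_set_self (by omega)]
        rfl
      · have hne : m.toNat ≠ p := by omega
        rw [if_neg h1, if_neg (by simp [h1, h2]), List.getD_eq_getElem?_getD,
          List.getD_eq_getElem?_getD, List.getElem?_set_ne hne]


-- membership in the nucleotide set is A's chained comparison
theorem pvContains_nuc (c : Char) : PySem.Set.contains pvNuc c = pvAUGC c := by
  simp [pvNuc, pvAUGC, PySem.Set.ofList, PySem.Set.contains, PySem.Set.add, PySem.Set.empty, Bool.or_assoc]
  rw [Bool.eq_iff_iff]; simp

-- take of a mapped range is the mapped smaller range
theorem pvTakeMapRange {a : Type} (f : Nat → a) (k n : Nat) (h : k ≤ n) :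
    ((List.range n).map f).take k = (List.range k).map f := by
  rw [← List.map_take, List.take_range, Nat.min_eq_left h]

-- the guard-and-membership condition of B's step is pvNonskip
theorem pvCond_eq (ins outs : List Char) (a : Nat) (ha : a < ins.length) :
    (pvAUGC (ins.getD a ' ') ||
      ((decide (((a:Int)) < ((outs.length : Nat) : Int))) && pvAUGC (outs.getD a ' '))) =
    pvNonskip ins outs a := by
  by_cases hb : a < outs.length
  · have hd : (decide (((a:Int)) < ((outs.length : Nat) : Int))) = true := by
      simp [hb]
    rw [hd, Bool.true_and]; rfl
  · have hd : (decide (((a:Int)) < ((outs.length : Nat) : Int))) = false := by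
      simp; omega
    have h1 : outs.getD a ' ' = ' ' := List.getD_eq_default _ _ (by omega)
    rw [hd, Bool.false_and, Bool.or_false]
    unfold pvNonskip
    rw [h1]
    simp [pvAUGC]

-- B's per-column step list, normalised over the index range
theorem pvSteps_eq (ins outs : List Char) :
    ((PySem.List.enumerate ins 0).map (fun ac =>
      if PySem.Set.contains pvNuc ac.2 ||
         (decide (ac.1 < (outs.length : Int)) && PySem.Set.contains pvNuc (PySem.List.pyGetD outs ac.1 ' '))
      then (1:Int) else 0))
    = (List.range ins.length).map (fun a => if pvNonskip ins outs a then (1:Int) else 0) := by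
  rw [PySem.List.enumerate_eq_map_pyRange ins ' ']
  simp only [PySem.List.len_eq, PySem.List.pyRange_zero_natCast, List.map_map]
  apply List.map_congr_left
  intro a ha
  have ha' : a < ins.length := List.mem_range.mp ha
  simp only [Function.comp_apply, pvContains_nuc, PySem.List.pyGetD_natCast]
  rw [pvCond_eq ins outs a ha']

-- B's marked-position list is exactly A's marks list
theorem pvM_eq (ins outs : List Char) (rb : Int) :
    (((PySem.List.enumerate ins 0).filter (fun ac => PySem.Set.contains pvNuc ac.2)).map
      (fun ac => rb + PySem.List.pyGetD
        (List.scanl (· + ·) 0 ((PySem.List.enumerate ins 0).map (fun ac =>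
          if PySem.Set.contains pvNuc ac.2 ||
             (decide (ac.1 < (outs.length : Int)) && PySem.Set.contains pvNuc (PySem.List.pyGetD outs ac.1 ' '))
          then (1:Int) else 0))) ac.1 0))
    = pvMarks ins outs rb := by
  rw [pvSteps_eq, pvMarks_closed]
  rw [PySem.List.enumerate_eq_map_pyRange ins ' ']
  simp only [PySem.List.len_eq, PySem.List.pyRange_zero_natCast, List.map_map, List.filter_map]
  have hfil : List.filter ((fun ac : Int × Char => PySem.Set.contains pvNuc ac.2) ∘
        ((fun j => (j, PySem.List.pyGetD ins j ' ')) ∘ fun k : Nat => (k : Int))) (List.range ins.length)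
      = List.filter (fun a => pvAUGC (ins.getD a ' ')) (List.range ins.length) := by
    apply List.filter_congr
    intro a _
    simp only [Function.comp_apply, pvContains_nuc, PySem.List.pyGetD_natCast]
  rw [hfil]
  apply List.map_congr_left
  intro a ha
  have ha' : a < ins.length := List.mem_range.mp (List.mem_of_mem_filter ha)
  simp only [Function.comp_apply, PySem.List.pyGetD_natCast]
  rw [pvScanl_getD _ _ _ (by simp; omega), zero_add, pvTakeMapRange _ _ _ (Nat.le_of_lt ha'),
    pvSum_indicator]
  rfl

-- set membership as a decide
theorem pvMemOfList (M : List Int) (p : Int) :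
    PySem.Set.contains (PySem.Set.ofList M) p = decide (p ∈ M) := by
  rw [Bool.eq_iff_iff]
  simp [PySem.Set.contains_iff, PySem.Set.mem_ofList]

theorem pvGetD_replicate (n p : Nat) : (List.replicate n (".":String)).getD p "." = "." := by
  by_cases h : p < n
  · rw [List.getD_eq_getElem _ _ (by simpa using h), List.getElem_replicate]
  · rw [List.getD_eq_default _ _ (by simpa using h)]

-- bounds on A's marks, from Pre_ (and, for the lower bound, from ¬D_)
theorem pvMarks_bounds (oS iS : String) (rb L : Int)
    (hpre : ∀ a, a < iS.toList.length →
      if pvAUGC (iS.toList.getD a ' ') then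
        -(max L 0) ≤ pvIdxAt iS.toList oS.toList rb a ∧ pvIdxAt iS.toList oS.toList rb a < max L 0
      else a < oS.toList.length) :
    ∀ m ∈ pvMarks iS.toList oS.toList rb, -(max L 0) ≤ m ∧ m < max L 0 := by
  intro m hm
  rw [pvMarks_closed] at hm
  obtain ⟨a, ha, rfl⟩ := List.mem_map.mp hm
  have h1 := List.mem_filter.mp ha
  have h2 : a < iS.toList.length := List.mem_range.mp h1.1
  have := hpre a h2
  rwa [if_pos (by simpa using h1.2)] at this

-- the running index is monotone in the column
theorem pvIdxAt_mono (ins outs : List Char) (rb : Int) {a b : Nat} (h : a ≤ b) :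
    pvIdxAt ins outs rb a ≤ pvIdxAt ins outs rb b := by
  unfold pvIdxAt
  have := List.Sublist.countP_le (p := pvNonskip ins outs) (List.range_sublist.mpr h)
  omega

-- every contact column lies at or after the first one
theorem pvTakeWhile_le {a : Nat} (ins : List Char) (ha : a < ins.length)
    (h : pvAUGC (ins.getD a ' ') = true) :
    (ins.takeWhile (fun c => !pvAUGC c)).length ≤ a := by
  by_contra hlt
  rw [not_le] at hlt
  have hpre := List.takeWhile_prefix (l := ins) (fun c => !pvAUGC c)
  have hget : (ins.takeWhile (fun c => !pvAUGC c))[a] = ins[a] := hpre.getElem hlt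
  have hmem : (ins.takeWhile (fun c => !pvAUGC c))[a] ∈ ins.takeWhile (fun c => !pvAUGC c) :=
    List.getElem_mem hlt
  have := List.mem_takeWhile_imp hmem
  rw [hget] at this
  rw [List.getD_eq_getElem _ _ ha] at h
  simp [h] at this

-- counting nucleotide positions of outs below k is counting them in outs.take k
theorem pvCount_take : ∀ (k : Nat) (outs : List Char),
    (List.range k).countP (fun b => pvAUGC (outs.getD b ' ')) = (outs.take k).countP pvAUGC := by
  intro k
  induction k with
  | zero => intro outs; simp
  | succ k ih =>
    intro outs
    rw [List.range_succ, List.countP_append, List.take_succ, List.countP_append, ih]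
    cases h : outs[k]? with
    | none => simp [List.countP_cons, List.getD_eq_getElem?_getD, h, pvAUGC]
    | some c => simp [List.countP_cons, List.getD_eq_getElem?_getD, h]

-- the index at the first contact column, in D_'s closed form
theorem pvIdxAt_first (ins outs : List Char) (rb : Int) :
    pvIdxAt ins outs rb (ins.takeWhile (fun c => !pvAUGC c)).length
      = rb + ((outs.take (ins.takeWhile (fun c => !pvAUGC c)).length).countP pvAUGC : Int) := by
  unfold pvIdxAt
  have hk : (ins.takeWhile (fun c => !pvAUGC c)).length ≤ ins.length :=
    (List.takeWhile_prefix _).length_le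
  have hcong : (List.range (ins.takeWhile (fun c => !pvAUGC c)).length).countP (pvNonskip ins outs)
      = (List.range (ins.takeWhile (fun c => !pvAUGC c)).length).countP
          (fun b => pvAUGC (outs.getD b ' ')) := by
    apply List.countP_congr
    intro b hb
    have hbk : b < (ins.takeWhile (fun c => !pvAUGC c)).length := List.mem_range.mp hb
    have hpre := List.takeWhile_prefix (l := ins) (fun c => !pvAUGC c)
    have hget : (ins.takeWhile (fun c => !pvAUGC c))[b] = ins[b] := hpre.getElem hbk
    have hmem : (ins.takeWhile (fun c => !pvAUGC c))[b] ∈ ins.takeWhile (fun c => !pvAUGC c) :=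
      List.getElem_mem hbk
    have hb2 := List.mem_takeWhile_imp hmem
    rw [hget] at hb2
    have hblen : b < ins.length := lt_of_lt_of_le hbk hk
    unfold pvNonskip
    rw [List.getD_eq_getElem _ _ hblen]
    simp at hb2
    rw [hb2, Bool.false_or]
  rw [hcong, pvCount_take]

-- ===== VERDICT =====
theorem getResultSequence_RNAhybrid_spec : Claim_unchanged_getResultSequence_RNAhybrid := by
  intro oS iS rb L ic hdom hpre hnd
  unfold Pre_getResultSequence_RNAhybrid at hpre
  unfold getResultSequence_RNAhybrid getResultSequence_RNAhybrid_alt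
  simp only []
  rw [pvLoopA_eq_foldl_marks, pvM_eq]
  congr 1
  have hbnd := pvMarks_bounds oS iS rb L hpre
  have hlow : ∀ m ∈ pvMarks iS.toList oS.toList rb, 0 ≤ m := by
    intro m hm
    rw [pvMarks_closed] at hm
    obtain ⟨a, ha, rfl⟩ := List.mem_map.mp hm
    have h1 := List.mem_filter.mp ha
    have h2 : a < iS.toList.length := List.mem_range.mp h1.1
    by_contra hneg
    apply hnd
    have hk_le : (iS.toList.takeWhile (fun c => !pvAUGC c)).length ≤ a :=
      pvTakeWhile_le _ h2 (by simpa using h1.2)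
    refine ⟨lt_of_le_of_lt hk_le h2, ?_⟩
    have hmono := pvIdxAt_mono iS.toList oS.toList rb hk_le
    rw [← pvIdxAt_first]
    omega
  have hbnd2 : ∀ m ∈ pvMarks iS.toList oS.toList rb,
      0 ≤ m ∧ m < ((List.replicate L.toNat (".":String)).length : Int) := by
    intro m hm
    have h1 := hbnd m hm
    have h2 := hlow m hm
    simp only [List.length_replicate]
    constructor
    · exact h2
    · have : ((L.toNat : Int)) = max L 0 := Int.ofNat_toNat L
      omega
  rw [pvFoldSet ic _ _ hbnd2]
  rw [PySem.List.pyRange_one]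
  simp only [List.map_map, List.length_replicate, Int.sub_zero]
  apply List.map_congr_left
  intro p hp
  simp only [Function.comp_apply, pvMemOfList, pvGetD_replicate, zero_add]
  split_ifs with h1 h2 <;> first | rfl | (exfalso; simp_all)

theorem getResultSequence_RNAhybrid_changed : Claim_changed_getResultSequence_RNAhybrid := by
  unfold Claim_changed_getResultSequence_RNAhybrid; decide
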